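-- pv_equiv track=rewrite | github.com/kharybdys/adventOfCode2023 | advent/year_2024/puzzle_2/solve.py | valid_levels_dampened
-- ===== SOURCE A (Python) =====
-- from collections.abc import Generator
--
-- def calculate_differences(levels: list[int]) -> Generator[int, None, None]:
--     previous_level = levels[0]
--     for level in levels[1:]:
--         yield level - previous_level
--         previous_level = level
--
-- POS_DIFFERENCES = {1, 2, 3}
--
-- NEG_DIFFERENCES = {-1, -2, -3}
--
-- def valid_levels(level_differences: set[int]) -> int:
--     if level_differences <= POS_DIFFERENCES or level_differences <= NEG_DIFFERENCES:
--         return 1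
--     return 0
--
-- def valid_levels_dampened(levels: list[int]) -> int:
--     full_diffs = set(calculate_differences(levels))
--     if valid_levels(full_diffs):
--         return 1
--     for i in range(0, len(levels)):
--         diffs = set(calculate_differences(levels[0:i] + levels[i+1:]))
--         if valid_levels(diffs):
--             return 1
--     return 0
-- ===== SOURCE B (Python) =====
-- POS_DIFFERENCES = {1, 2, 3}
--
-- NEG_DIFFERENCES = {-1, -2, -3}
--
--
-- def _first_bad(levels, diffs):
--     """Index of the first adjacent pair whose difference is not in diffs, or None."""
--     for i in range(len(levels) - 1):
--         if levels[i + 1] - levels[i] not in diffs: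
--             return i
--     return None
--
--
-- def _all_in(levels, diffs):
--     return all(b - a in diffs for a, b in zip(levels, levels[1:]))
--
--
-- def valid_levels_dampened(levels):
--     # Only a removal adjacent to the first violating pair can help for a given
--     # direction, so at most four O(n) re-checks are needed: O(n) overall.
--     for diffs in (POS_DIFFERENCES, NEG_DIFFERENCES):
--         i = _first_bad(levels, diffs)
--         if i is None:
--             return 1
--         for k in (i, i + 1):
--             if _all_in(levels[:k] + levels[k + 1:], diffs):
--                 return 1
--     return 0
-- ===== Notes on version B (the rewrite author's own statement) =====
-- stated objective: faster
-- what changed: B locates the first adjacent-difference violation for each direction and re-checks only the two removals adjacent to it (at most four linear scans), instead of A's rebuilding and re-testing the difference set for every one-element removal.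
import Mathlib
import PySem

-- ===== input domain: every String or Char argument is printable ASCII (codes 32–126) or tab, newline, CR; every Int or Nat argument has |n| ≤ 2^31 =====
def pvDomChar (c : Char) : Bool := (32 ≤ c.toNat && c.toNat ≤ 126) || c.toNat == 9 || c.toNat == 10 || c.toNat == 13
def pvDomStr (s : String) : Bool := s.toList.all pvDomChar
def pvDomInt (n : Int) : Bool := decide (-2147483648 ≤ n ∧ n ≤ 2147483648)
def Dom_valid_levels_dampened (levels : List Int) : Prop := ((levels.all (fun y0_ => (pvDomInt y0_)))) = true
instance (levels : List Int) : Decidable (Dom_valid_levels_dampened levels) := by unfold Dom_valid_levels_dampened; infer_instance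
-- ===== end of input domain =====

-- B replaces A's n re-checks of every one-element removal by at most four linear checks
-- of the removals adjacent to the first violating pair of each direction (asymptotic speed-up).

-- ===== PORT A =====
-- calculate_differences(levels): previous = first element; yield each level minus the previous
def pvDiffsGo : Int → List Int → List Int
  | _, [] => []
  | p, x :: xs => (x - p) :: pvDiffsGo x xs

-- reading the first element raises IndexError on the empty list (excluded by Pre_); the nil branch is arbitrary
def pvCalcDiffs : List Int → List Int
  | [] => []
  | p :: rest => pvDiffsGo p rest

def POS_DIFFERENCES : PySem.Set Int := [1, 2, 3]

def NEG_DIFFERENCES : PySem.Set Int := [-1, -2, -3]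

def valid_levels (level_differences : PySem.Set Int) : Int :=
  if PySem.Set.issubset level_differences POS_DIFFERENCES
      || PySem.Set.issubset level_differences NEG_DIFFERENCES then 1 else 0

def valid_levels_dampened (levels : List Int) : Int :=
  let full_diffs := PySem.Set.ofList (pvCalcDiffs levels)
  if valid_levels full_diffs != 0 then 1
  else if (List.range levels.length).any (fun i =>
      valid_levels (PySem.Set.ofList (pvCalcDiffs
        (PySem.List.slice levels (some 0) (some (i : Int))
          ++ PySem.List.slice levels (some ((i : Int) + 1)) none))) != 0) then 1
  else 0

-- ===== PORT B =====
-- _first_bad(levels, diffs): index of first adjacent pair whose difference is not in diffs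
def altFirstBad (S : List Int) : List Int → Option Nat
  | x :: y :: rest =>
      if S.contains (y - x) then (altFirstBad S (y :: rest)).map (· + 1) else some 0
  | _ => none

-- _all_in(levels, diffs): all(b - a in diffs for a, b in zip(levels, levels[1:]))
def altAllIn (S : List Int) (l : List Int) : Bool :=
  (l.zip (l.drop 1)).all (fun p => S.contains (p.2 - p.1))

-- body of the 'for diffs in (POS, NEG)' loop: True iff this direction yields validity
def altTry (S : List Int) (levels : List Int) : Bool :=
  match altFirstBad S levels with
  | none => true
  | some i =>
      altAllIn S (PySem.List.slice levels none (some (i : Int))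
        ++ PySem.List.slice levels (some ((i : Int) + 1)) none)
      || altAllIn S (PySem.List.slice levels none (some ((i + 1 : Nat) : Int))
        ++ PySem.List.slice levels (some (((i + 1 : Nat) : Int) + 1)) none)

def valid_levels_dampened_alt (levels : List Int) : Int :=
  if altTry [1, 2, 3] levels then 1
  else if altTry [-1, -2, -3] levels then 1
  else 0

-- ===== PRECONDITION & SPEC =====
-- Python A reads the first element, an IndexError on the empty list; Pre_ excludes exactly that input.
def Pre_valid_levels_dampened (levels : List Int) : Prop := levels ≠ []
instance (levels : List Int) : Decidable (Pre_valid_levels_dampened levels) := by unfold Pre_valid_levels_dampened; infer_instance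
def pvWitness_valid_levels_dampened : List Int := [1, 2]

def Spec_valid_levels_dampened (levels : List Int) (out : Int) : Prop := out = valid_levels_dampened_alt levels
instance (levels : List Int) (out : Int) : Decidable (Spec_valid_levels_dampened levels out) := by unfold Spec_valid_levels_dampened; infer_instance

-- ===== CLAIM (what is proved, stated in full; the proofs are below) =====
def Claim_equal_valid_levels_dampened : Prop := ∀ (levels : List Int), Dom_valid_levels_dampened levels → Pre_valid_levels_dampened levels → Spec_valid_levels_dampened levels (valid_levels_dampened levels)

-- ===== LEMMAS AND PROOFS =====

-- the list with index k removed (both ports' slice expressions reduce to this)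
def rmAt (l : List Int) (k : Nat) : List Int := l.take k ++ l.drop (k + 1)

-- all adjacent differences lie in S
def GoodDiffs (S : List Int) (l : List Int) : Prop :=
  ∀ j, j + 1 < l.length → l.getD (j + 1) 0 - l.getD j 0 ∈ S

theorem slice_pair_eq_rmAt (l : List Int) (k : Nat) :
    PySem.List.slice l (some 0) (some (k : Int))
      ++ PySem.List.slice l (some ((k : Int) + 1)) none = rmAt l k := by
  have h1 : ((k : Int) + 1) = ((k + 1 : Nat) : Int) := by push_cast; ring
  rw [h1, PySem.List.slice_from_natCast, PySem.List.slice_zero_start,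
    PySem.List.slice_to_natCast, rmAt]

theorem slice_pair_eq_rmAt' (l : List Int) (k : Nat) :
    PySem.List.slice l none (some (k : Int))
      ++ PySem.List.slice l (some ((k : Int) + 1)) none = rmAt l k := by
  rw [← slice_pair_eq_rmAt, PySem.List.slice_zero_start]

theorem goodDiffs_nil (S : List Int) : GoodDiffs S [] := by
  intro j h; simp at h

theorem goodDiffs_single (S : List Int) (x : Int) : GoodDiffs S [x] := by
  intro j h; simp at h

theorem goodDiffs_cons (S : List Int) (x y : Int) (t : List Int) :
    GoodDiffs S (x :: y :: t) ↔ (y - x ∈ S ∧ GoodDiffs S (y :: t)) := by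
  constructor
  · intro h
    refine ⟨h 0 (by simp), ?_⟩
    intro j hj
    have := h (j + 1) (by simp at hj ⊢; omega)
    simpa using this
  · rintro ⟨h0, h⟩ j hj
    match j with
    | 0 => simpa using h0
    | j + 1 =>
      have := h j (by simp at hj ⊢; omega)
      simpa using this

theorem altAllIn_iff (S l) : altAllIn S l = true ↔ GoodDiffs S l := by
  match l with
  | [] => simp [altAllIn, goodDiffs_nil]
  | [x] => simp [altAllIn, goodDiffs_single]
  | x :: y :: t =>
    have ih := altAllIn_iff S (y :: t)
    rw [goodDiffs_cons]
    simp only [altAllIn, List.drop_succ_cons, List.drop_zero, List.zip_cons_cons, List.all_cons,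
      Bool.and_eq_true] at *
    rw [ih]
    simp [List.contains_iff_mem]

theorem pvCalcDiffs_all_iff (S : List Int) (l : List Int) :
    (pvCalcDiffs l).all (fun d => S.contains d) = true ↔ GoodDiffs S l := by
  match l with
  | [] => simp [pvCalcDiffs, goodDiffs_nil]
  | [x] => simp [pvCalcDiffs, pvDiffsGo, goodDiffs_single]
  | x :: y :: t =>
    have ih := pvCalcDiffs_all_iff S (y :: t)
    rw [goodDiffs_cons]
    simp only [pvCalcDiffs, pvDiffsGo, List.all_cons, Bool.and_eq_true] at *
    rw [ih]
    simp [List.contains_iff_mem]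

-- A's inner test on a list l: valid iff both-direction GoodDiffs over the diffs of l
theorem validA_iff (l : List Int) :
    (valid_levels (PySem.Set.ofList (pvCalcDiffs l)) != 0) = true ↔
      (GoodDiffs [1, 2, 3] l ∨ GoodDiffs [-1, -2, -3] l) := by
  have hsub : ∀ (t : List Int),
      PySem.Set.issubset (PySem.Set.ofList (pvCalcDiffs l)) t = true ↔
        (pvCalcDiffs l).all (fun d => t.contains d) = true := by
    intro t
    simp only [PySem.Set.issubset, PySem.Set.contains, List.all_eq_true]
    constructor
    · intro h d hd
      exact h d ((PySem.Set.mem_ofList _ _).2 hd)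
    · intro h d hd
      exact h d ((PySem.Set.mem_ofList _ _).1 hd)
  unfold valid_levels
  split
  · rename_i hc
    simp only [Bool.or_eq_true] at hc
    constructor
    · intro _
      rcases hc with hc | hc
      · exact Or.inl ((pvCalcDiffs_all_iff _ _).1 ((hsub POS_DIFFERENCES).1 hc))
      · exact Or.inr ((pvCalcDiffs_all_iff _ _).1 ((hsub NEG_DIFFERENCES).1 hc))
    · intro _; decide
  · rename_i hc
    simp only [Bool.or_eq_true, not_or] at hc
    constructor
    · intro h; simp at h
    · rintro (h | h)
      · exact absurd ((hsub POS_DIFFERENCES).2 ((pvCalcDiffs_all_iff _ _).2 h)) hc.1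
      · exact absurd ((hsub NEG_DIFFERENCES).2 ((pvCalcDiffs_all_iff _ _).2 h)) hc.2

theorem altFirstBad_none_iff (S l) : altFirstBad S l = none ↔ GoodDiffs S l := by
  match l with
  | [] => simp [altFirstBad, goodDiffs_nil]
  | [x] => simp [altFirstBad, goodDiffs_single]
  | x :: y :: t =>
    have ih := altFirstBad_none_iff S (y :: t)
    rw [goodDiffs_cons]
    unfold altFirstBad
    split
    · rename_i hc
      simp only [Option.map_eq_none_iff]
      rw [ih]
      simp [List.contains_iff_mem] at hc
      tauto
    · rename_i hc
      simp only [reduceCtorEq, false_iff, not_and]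
      intro hy
      simp [List.contains_iff_mem] at hc
      tauto

theorem altFirstBad_some (S l i) (h : altFirstBad S l = some i) :
    i + 1 < l.length ∧ l.getD (i + 1) 0 - l.getD i 0 ∉ S := by
  match l with
  | [] => simp [altFirstBad] at h
  | [x] => simp [altFirstBad] at h
  | x :: y :: t =>
    unfold altFirstBad at h
    split at h
    · rename_i hc
      simp only [Option.map_eq_some_iff] at h
      obtain ⟨i', hi', rfl⟩ := h
      have := altFirstBad_some S (y :: t) i' hi'
      constructor
      · simp at this ⊢; omega
      · simpa using this.2
    · rename_i hc
      simp only [Option.some.injEq] at h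
      subst h
      refine ⟨by simp, ?_⟩
      simp [List.contains_iff_mem] at hc
      simpa using hc

theorem length_rmAt (l : List Int) (k : Nat) (hk : k < l.length) :
    (rmAt l k).length = l.length - 1 := by
  simp [rmAt]; omega

theorem rmAt_getD_lt (l : List Int) (k m : Nat) (hm : m < k) (h : m < (rmAt l k).length)
    (h' : m < l.length) : (rmAt l k).getD m 0 = l.getD m 0 := by
  rw [List.getD_eq_getElem _ _ h, List.getD_eq_getElem _ _ h']
  unfold rmAt at *
  rw [List.getElem_append_left (by simp; omega), List.getElem_take]

theorem rmAt_getD_ge (l : List Int) (k m : Nat) (hm : k ≤ m) (h : m < (rmAt l k).length)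
    (h' : m + 1 < l.length) : (rmAt l k).getD m 0 = l.getD (m + 1) 0 := by
  rw [List.getD_eq_getElem _ _ h, List.getD_eq_getElem _ _ h']
  unfold rmAt at *
  simp only [List.length_append, List.length_take, List.length_drop] at h
  rw [List.getElem_append_right (by simp; omega)]
  rw [List.getElem_drop]
  congr 1
  simp
  omega

-- persistence: a removal away from the first bad pair keeps that bad pair
theorem rm_good_adjacent (S : List Int) (l : List Int) (i k : Nat)
    (hfb : altFirstBad S l = some i) (hk : k < l.length)
    (hg : GoodDiffs S (rmAt l k)) : k = i ∨ k = i + 1 := by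
  obtain ⟨hilen, hbad⟩ := altFirstBad_some S l i hfb
  by_contra hne
  push_neg at hne
  obtain ⟨hne1, hne2⟩ := hne
  have hlen := length_rmAt l k hk
  rcases Nat.lt_or_ge k i with hki | hki
  · -- k < i: the pair (i, i+1) appears at positions (i-1, i) of rmAt l k
    obtain ⟨j, rfl⟩ : ∃ j, i = j + 1 := ⟨i - 1, by omega⟩
    have := hg j (by omega)
    rw [rmAt_getD_ge l k (j + 1) (by omega) (by omega) (by omega),
        rmAt_getD_ge l k j (by omega) (by omega) (by omega)] at this
    exact hbad this
  · -- k ≥ i + 2: the pair (i, i+1) stays at positions (i, i+1)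
    have hki2 : i + 2 ≤ k := by omega
    have := hg i (by omega)
    rw [rmAt_getD_lt l k (i + 1) (by omega) (by omega) (by omega),
        rmAt_getD_lt l k i (by omega) (by omega) (by omega)] at this
    exact hbad this

theorem altTry_iff (S : List Int) (l : List Int) :
    altTry S l = true ↔
      (GoodDiffs S l ∨ ∃ k, k < l.length ∧ GoodDiffs S (rmAt l k)) := by
  unfold altTry
  split
  · rename_i hnone
    simp only [true_iff]
    exact Or.inl ((altFirstBad_none_iff S l).1 hnone)
  · rename_i i hsome
    have hlen := (altFirstBad_some S l i hsome).1
    rw [slice_pair_eq_rmAt' l i, slice_pair_eq_rmAt' l (i + 1)]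
    simp only [Bool.or_eq_true, altAllIn_iff]
    constructor
    · rintro (h | h)
      · exact Or.inr ⟨i, by omega, h⟩
      · exact Or.inr ⟨i + 1, by omega, h⟩
    · rintro (h | ⟨k, hk, h⟩)
      · exact absurd hsome (by rw [(altFirstBad_none_iff S l).2 h]; simp)
      · rcases rm_good_adjacent S l i k hsome hk h with rfl | rfl
        · exact Or.inl h
        · exact Or.inr h

-- A's result as a proposition
theorem A_cases (l : List Int) :
    valid_levels_dampened l =
      (if (valid_levels (PySem.Set.ofList (pvCalcDiffs l)) != 0) = true then 1
       else if ((List.range l.length).any (fun i =>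
          valid_levels (PySem.Set.ofList (pvCalcDiffs
            (PySem.List.slice l (some 0) (some (i : Int))
              ++ PySem.List.slice l (some ((i : Int) + 1)) none))) != 0)) = true then 1
       else 0) := rfl

theorem A_eq_one_iff (l : List Int) :
    valid_levels_dampened l = 1 ↔
      ((GoodDiffs [1, 2, 3] l ∨ GoodDiffs [-1, -2, -3] l) ∨
        ∃ k, k < l.length ∧
          (GoodDiffs [1, 2, 3] (rmAt l k) ∨ GoodDiffs [-1, -2, -3] (rmAt l k))) := by
  rw [A_cases l]
  have hPOS : POS_DIFFERENCES = [1, 2, 3] := rfl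
  have hNEG : NEG_DIFFERENCES = [-1, -2, -3] := rfl
  split
  · rename_i hfull
    simp only [true_iff]
    exact Or.inl ((validA_iff l).1 hfull)
  · rename_i hfull
    have hnotfull : ¬ (GoodDiffs [1, 2, 3] l ∨ GoodDiffs [-1, -2, -3] l) := by
      intro h
      exact hfull ((validA_iff l).2 h)
    split
    · rename_i hany
      simp only [true_iff]
      rw [List.any_eq_true] at hany
      obtain ⟨i, hi, hvi⟩ := hany
      rw [List.mem_range] at hi
      rw [slice_pair_eq_rmAt l i] at hvi
      exact Or.inr ⟨i, hi, (validA_iff (rmAt l i)).1 hvi⟩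
    · rename_i hany
      constructor
      · intro h; exact absurd h (by decide)
      · intro h
        exfalso
        rcases h with h | ⟨k, hk, hg⟩
        · exact hnotfull h
        · apply hany
          rw [List.any_eq_true]
          refine ⟨k, List.mem_range.2 hk, ?_⟩
          rw [slice_pair_eq_rmAt l k]
          exact (validA_iff (rmAt l k)).2 hg

theorem A_val (l : List Int) : valid_levels_dampened l = 0 ∨ valid_levels_dampened l = 1 := by
  rw [A_cases l]
  split
  · right; rfl
  · split
    · right; rfl
    · left; rfl

theorem B_eq_one_iff (l : List Int) :
    valid_levels_dampened_alt l = 1 ↔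
      ((GoodDiffs [1, 2, 3] l ∨ GoodDiffs [-1, -2, -3] l) ∨
        ∃ k, k < l.length ∧
          (GoodDiffs [1, 2, 3] (rmAt l k) ∨ GoodDiffs [-1, -2, -3] (rmAt l k))) := by
  unfold valid_levels_dampened_alt
  have hP := altTry_iff [1, 2, 3] l
  have hN := altTry_iff [-1, -2, -3] l
  constructor
  · intro h
    split at h
    · rename_i ht
      rcases hP.1 ht with hg | ⟨k, hk, hg⟩
      · exact Or.inl (Or.inl hg)
      · exact Or.inr ⟨k, hk, Or.inl hg⟩
    · split at h
      · rename_i ht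
        rcases hN.1 ht with hg | ⟨k, hk, hg⟩
        · exact Or.inl (Or.inr hg)
        · exact Or.inr ⟨k, hk, Or.inr hg⟩
      · simp at h
  · intro h
    rcases h with (hg | hg) | ⟨k, hk, (hg | hg)⟩
    · rw [hP.2 (Or.inl hg)]; rfl
    · have : altTry [-1, -2, -3] l = true := hN.2 (Or.inl hg)
      rw [this]; split <;> rfl
    · rw [hP.2 (Or.inr ⟨k, hk, hg⟩)]; rfl
    · have : altTry [-1, -2, -3] l = true := hN.2 (Or.inr ⟨k, hk, hg⟩)
      rw [this]; split <;> rfl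

theorem B_val (l : List Int) :
    valid_levels_dampened_alt l = 0 ∨ valid_levels_dampened_alt l = 1 := by
  unfold valid_levels_dampened_alt
  split
  · right; rfl
  · split
    · right; rfl
    · left; rfl

-- ===== VERDICT (by name: the statement is the Claim_ definition above) =====
theorem valid_levels_dampened_spec : Claim_equal_valid_levels_dampened := by
  intro levels _ _
  unfold Spec_valid_levels_dampened
  have hA := A_eq_one_iff levels
  have hB := B_eq_one_iff levels
  rcases A_val levels with h0 | h1
  · rcases B_val levels with g0 | g1
    · rw [h0, g0]
    · exfalso
      rw [h0] at hA
      exact absurd (hB.1 g1) (by rw [← hA]; decide)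
  · rw [h1, (hB.2 (hA.1 h1))]
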